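-- pv_equiv track=rewrite | github.com/wang1st/z-pulse | backend/app/services/daily_briefing/guardrails.py | find_sensitive_hits
-- ===== SOURCE A (Python) =====
-- from typing import Any, Dict, List, Sequence, Tuple
--
-- def find_sensitive_hits(text: str, phrases: Sequence[str]) -> List[str]:
--     if not isinstance(text, str) or not text:
--         return []
--     hits: List[str] = []
--     for p in phrases:
--         if p and p in text:
--             hits.append(p)
--     return hits
-- ===== SOURCE B (Python) =====
-- from typing import Any, Dict, List, Sequence, Tuple
--
-- def find_sensitive_hits(text: str, phrases: Sequence[str]) -> List[str]:
--     if not isinstance(text, str) or not text: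
--         return []
--     n = len(text)
--     lengths = set()
--     for p in phrases:
--         if p and len(p) <= n:
--             lengths.add(len(p))
--     subs = set()
--     for L in lengths:
--         for i in range(n - L + 1):
--             subs.add(text[i:i+L])
--     return [p for p in phrases if p and p in subs]
-- ===== Notes on version B (the rewrite author's own statement) =====
-- stated objective: faster
-- what changed: Instead of running a substring search over the whole text for every phrase, B slides windows over the text once per distinct phrase length, collecting those substrings into a hash set, then filters the phrases by O(1) set membership.
import Mathlib
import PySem

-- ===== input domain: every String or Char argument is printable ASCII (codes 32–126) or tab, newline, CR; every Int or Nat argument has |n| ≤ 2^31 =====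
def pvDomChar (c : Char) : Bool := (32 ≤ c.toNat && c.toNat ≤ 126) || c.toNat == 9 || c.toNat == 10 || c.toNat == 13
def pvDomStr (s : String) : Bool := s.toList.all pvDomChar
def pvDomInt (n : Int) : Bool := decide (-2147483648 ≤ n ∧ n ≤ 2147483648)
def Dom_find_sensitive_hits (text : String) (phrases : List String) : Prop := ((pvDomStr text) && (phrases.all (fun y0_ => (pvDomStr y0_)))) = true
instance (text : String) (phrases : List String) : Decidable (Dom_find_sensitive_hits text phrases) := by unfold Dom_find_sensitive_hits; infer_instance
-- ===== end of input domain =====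

-- B replaces the per-phrase substring search with one window sweep per distinct phrase
-- length, collecting all those substrings of the text into a set and filtering the
-- phrases by set membership (measurably faster when many phrases share few lengths).

-- ===== PORT A =====
def find_sensitive_hits (text : String) (phrases : List String) : List String :=
  if text.toList = [] then []
  else
    phrases.foldl (fun hits p =>
      if (!p.toList.isEmpty) && PySem.Str.isIn p text then hits ++ [p] else hits) []

-- ===== PORT B =====
def find_sensitive_hits_alt (text : String) (phrases : List String) : List String :=
  if text.toList = [] then []
  else
    let t := text.toList
    let n := t.length
    let lengths : PySem.Set Nat := phrases.foldl (fun s p =>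
      if (!p.toList.isEmpty) && decide (p.toList.length ≤ n) then PySem.Set.add s p.toList.length else s)
      PySem.Set.empty
    -- text[i:i+L] with 0 ≤ i and i+L ≤ n is exactly (t.drop i).take L
    let subs : PySem.Set (List Char) := lengths.foldl (fun s L =>
      (List.range (n - L + 1)).foldl (fun s i => PySem.Set.add s ((t.drop i).take L)) s)
      PySem.Set.empty
    phrases.filter (fun p => (!p.toList.isEmpty) && PySem.Set.contains subs p.toList)

-- ===== PRECONDITION & SPEC =====
def Spec_find_sensitive_hits (text : String) (phrases : List String) (out : List String) : Prop := out = find_sensitive_hits_alt text phrases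
instance (text : String) (phrases : List String) (out : List String) : Decidable (Spec_find_sensitive_hits text phrases out) := by unfold Spec_find_sensitive_hits; infer_instance

-- ===== CLAIM (what is proved, stated in full; the proofs are below) =====
def Claim_equal_find_sensitive_hits : Prop := ∀ (text : String) (phrases : List String), Dom_find_sensitive_hits text phrases → Spec_find_sensitive_hits text phrases (find_sensitive_hits text phrases)

-- ===== LEMMAS AND PROOFS =====

-- membership in a conditional set-building fold
theorem pv_mem_foldl_add_if {α β : Type} [BEq β] [LawfulBEq β]
    (l : List α) (c : α → Bool) (f : α → β) (s : PySem.Set β) (y : β) :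
    y ∈ l.foldl (fun s a => if c a then PySem.Set.add s (f a) else s) s ↔
      y ∈ s ∨ ∃ a ∈ l, c a ∧ y = f a := by
  induction l generalizing s with
  | nil => simp
  | cons a l ih =>
    simp only [List.foldl_cons, ih, List.mem_cons]
    by_cases h : c a = true <;> (simp [h, PySem.Set.mem_add]; try tauto)

-- membership in the nested window-collecting fold
theorem pv_mem_subs (t : List Char) (n : Nat) (Ls : List Nat) (s0 : PySem.Set (List Char)) (x : List Char) :
    x ∈ Ls.foldl (fun s L => (List.range (n - L + 1)).foldl
        (fun s i => PySem.Set.add s ((t.drop i).take L)) s) s0 ↔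
      x ∈ s0 ∨ ∃ L ∈ Ls, ∃ i, i < n - L + 1 ∧ x = (t.drop i).take L := by
  induction Ls generalizing s0 with
  | nil => simp
  | cons L Ls ih =>
    simp only [List.foldl_cons, ih, PySem.Set.mem_foldl_add, List.mem_range, List.mem_cons]
    constructor
    · rintro (((h | ⟨i, hi, hx⟩) ) | ⟨L', hL', h⟩)
      · exact Or.inl h
      · exact Or.inr ⟨L, Or.inl rfl, i, hi, hx⟩
      · exact Or.inr ⟨L', Or.inr hL', h⟩
    · rintro (h | ⟨L', (rfl | hL'), i, hi, hx⟩)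
      · exact Or.inl (Or.inl h)
      · exact Or.inl (Or.inr ⟨i, hi, hx⟩)
      · exact Or.inr ⟨L', hL', i, hi, hx⟩

-- a window is an infix
theorem pv_window_infix (t : List Char) (i L : Nat) : (t.drop i).take L <:+: t :=
  ((t.drop i).take_prefix L).isInfix.trans (t.drop_suffix i).isInfix

-- an infix is a window
theorem pv_infix_window {p t : List Char} (h : p <:+: t) :
    ∃ i, i + p.length ≤ t.length ∧ (t.drop i).take p.length = p := by
  obtain ⟨a, b, hab⟩ := h
  refine ⟨a.length, ?_, ?_⟩
  · subst hab; simp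
  · subst hab
    rw [List.append_assoc, List.drop_left, List.take_left]

-- ===== VERDICT (by name: the statement is the Claim_ definition above) =====
theorem find_sensitive_hits_spec : Claim_equal_find_sensitive_hits := by
  intro text phrases _
  unfold Spec_find_sensitive_hits find_sensitive_hits find_sensitive_hits_alt
  by_cases ht : text.toList = []
  · simp [ht]
  · simp only [ht, if_false]
    rw [PySem.List.foldl_append_if_eq_filter, List.nil_append]
    refine List.filter_congr ?_
    intro p hp
    by_cases hpe : p.toList = []
    · simp [hpe]
    · have hpe' : p.toList.isEmpty = false := by simpa [List.isEmpty_iff] using hpe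
      simp only [hpe', Bool.not_false, Bool.true_and]
      rw [Bool.eq_iff_iff, PySem.Str.isIn_iff_infix, PySem.Set.contains_iff, pv_mem_subs]
      constructor
      · intro h
        obtain ⟨i, hle, hw⟩ := pv_infix_window h
        refine Or.inr ⟨p.toList.length, ?_, i, by omega, hw.symm⟩
        rw [pv_mem_foldl_add_if]
        refine Or.inr ⟨p, hp, ?_, rfl⟩
        simp only [hpe', Bool.not_false, Bool.true_and, decide_eq_true_iff]
        omega
      · rintro (h | ⟨L, _, i, _, hx⟩)
        · simp [PySem.Set.empty] at h
        · rw [hx]; exact pv_window_infix _ _ _
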